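-- pv_equiv track=rewrite | github.com/coyo-hm/Algorithm_Study | PROGRAMMERES/2020 KAKAO BLIND RECRUITMENT/문자열 압축/02_221102.PY | solution
-- ===== SOURCE A (Python) =====
-- def solution(s):
--     answer = len(s)
--     for u in range(1, len(s)):
--         piece = ""
--         cnt = 1
--         res = ""
--         i = 0
--         while i < len(s):
--             if piece == s[i: i + u]:
--                 cnt += 1
--             else:
--                 if cnt == 1:
--                     res += piece
--                 else:
--                     res += str(cnt) + piece
--                     cnt = 1
--                 piece = s[i: i + u]
--             i = i + u
--         res += str(cnt) + piece if cnt != 1 else piece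
--         answer = min(answer, len(res))
--     return answer
-- ===== SOURCE B (Python) =====
-- def solution(s):
--     n = len(s)
--     best = n
--     for u in range(1, n):
--         full, rem = divmod(n, u)
--         # positions (in chunk units) where a new run of full-size chunks starts
--         cuts = [0] + [j for j in range(1, full)
--                       if s[j * u:(j + 1) * u] != s[(j - 1) * u:j * u]] + [full]
--         runs = [b - a for a, b in zip(cuts, cuts[1:])]
--         length = u * (len(cuts) - 1) + sum(len(str(c)) for c in runs if c > 1) + rem
--         best = min(best, length)
--     return best
-- ===== Notes on version B (the rewrite author's own statement) =====
-- stated objective: alternative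
-- what changed: A simulates the run-length encoder with a stateful while loop that builds each compressed string by concatenation and measures its length; B never encodes anything: per unit u it collects the chunk-boundary break positions, turns them into run lengths by differencing, and evaluates the closed formula u*(number of runs) + sum of digit lengths of multi-runs + (len(s) mod u) for the bare tail chunk.
import Mathlib
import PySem

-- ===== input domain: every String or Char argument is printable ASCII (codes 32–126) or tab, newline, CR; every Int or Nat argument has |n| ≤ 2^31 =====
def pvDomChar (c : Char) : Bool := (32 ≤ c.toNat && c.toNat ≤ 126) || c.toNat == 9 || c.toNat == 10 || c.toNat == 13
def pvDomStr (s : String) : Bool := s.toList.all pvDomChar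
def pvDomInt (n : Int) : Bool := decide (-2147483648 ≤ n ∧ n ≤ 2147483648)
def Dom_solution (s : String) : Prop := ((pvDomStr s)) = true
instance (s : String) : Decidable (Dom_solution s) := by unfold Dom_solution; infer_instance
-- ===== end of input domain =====

set_option maxRecDepth 8000


-- B replaces A's stateful encoder simulation (while loop building each compressed string by
-- concatenation) by break positions + differencing and the closed formula
-- u*(#runs) + Σ digit-lengths of multi-runs + n % u (alternative decomposition, same cost).

-- ===== PORT A =====
-- A's inner while loop: state (piece, cnt, res), i advances by u each step (u ≥ 1 for termination).
def solAStep (sl : List Char) (u : Nat) (hu : 0 < u) (piece : List Char) (cnt : Int)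
    (res : List Char) (i : Nat) : List Char × Int × List Char :=
  if i < sl.length then
    let ch := PySem.List.slice sl (some (i : Int)) (some ((i : Int) + (u : Int)))
    if piece = ch then
      solAStep sl u hu piece (cnt + 1) res (i + u)
    else
      if cnt = 1 then
        solAStep sl u hu ch 1 (res ++ piece) (i + u)
      else
        solAStep sl u hu ch 1 (res ++ PySem.Int.toChars cnt ++ piece) (i + u)
  else (piece, cnt, res)
termination_by sl.length - i
decreasing_by all_goals omega

def solution (s : String) : Int :=
  let sl := s.toList
  (List.range (sl.length - 1)).foldl
    (fun answer k =>
      let u : Nat := k + 1                 -- u runs over range(1, len(s))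
      let t := solAStep sl u (Nat.succ_pos k) [] 1 [] 0
      -- res += str(cnt) + piece if cnt != 1 else piece
      let res2 := t.2.2 ++ (if t.2.1 ≠ 1 then PySem.Int.toChars t.2.1 ++ t.1 else t.1)
      min answer (res2.length : Int))
    (sl.length : Int)

-- ===== PORT B =====
def solution_alt (s : String) : Int :=
  let sl := s.toList
  let n := sl.length
  (List.range (n - 1)).foldl
    (fun best k =>
      let u : Nat := k + 1                 -- u runs over range(1, len(s))
      -- full, rem = divmod(n, u)  (n, u ≥ 0, so Python divmod is Nat div/mod)
      let full : Nat := n / u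
      let rem : Nat := n % u
      -- cuts = [0] + [j for j in range(1, full) if s[j*u:(j+1)*u] != s[(j-1)*u:j*u]] + [full]
      let cuts : List Int :=
        (0 : Int) :: ((PySem.List.pyRange 1 (full : Int) 1).filter
          (fun j => PySem.List.slice sl (some (j * (u : Int))) (some ((j + 1) * (u : Int)))
                  ≠ PySem.List.slice sl (some ((j - 1) * (u : Int))) (some (j * (u : Int)))))
          ++ [(full : Int)]
      -- runs = [b - a for a, b in zip(cuts, cuts[1:])]
      let runs : List Int := List.zipWith (fun a b => b - a) cuts (PySem.List.slice cuts (some 1) none)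
      -- length = u*(len(cuts)-1) + sum(len(str(c)) for c in runs if c > 1) + rem
      let total : Int := (u : Int) * ((cuts.length : Int) - 1)
          + ((runs.filter (fun c => 1 < c)).map
              (fun c => ((PySem.Int.toChars c).length : Int))).sum
          + (rem : Int)
      min best total)
    (n : Int)

-- ===== PRECONDITION & SPEC =====
def Spec_solution (s : String) (out : Int) : Prop := out = solution_alt s
instance (s : String) (out : Int) : Decidable (Spec_solution s out) := by unfold Spec_solution; infer_instance

-- ===== CLAIM (what is proved, stated in full; the proofs are below) =====
def Claim_equal_solution : Prop := ∀ (s : String), Dom_solution s → Spec_solution s (solution s)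

-- ===== LEMMAS AND PROOFS =====

-- The sequence of chunks s[i:i+u], s[i+u:i+2u], … that A's while loop walks over.
def chunkSeq (sl : List Char) (u : Nat) (hu : 0 < u) (i : Nat) : List (List Char) :=
  if i < sl.length then
    PySem.List.slice sl (some (i : Int)) (some ((i : Int) + (u : Int))) :: chunkSeq sl u hu (i + u)
  else []
termination_by sl.length - i
decreasing_by omega

-- A's loop seen as a structural recursion over the chunk list.
def loopT : List (List Char) → List Char → Int → List Char → List Char × Int × List Char
  | [], piece, cnt, res => (piece, cnt, res)
  | ch :: cs, piece, cnt, res =>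
    if piece = ch then loopT cs piece (cnt + 1) res
    else if cnt = 1 then loopT cs ch 1 (res ++ piece)
    else loopT cs ch 1 (res ++ PySem.Int.toChars cnt ++ piece)

-- run-length groups of a chunk list, with a pending group (piece, cnt) in front.
def rleP (piece : List Char) (cnt : Int) : List (List Char) → List (List Char × Int)
  | [] => [(piece, cnt)]
  | c :: cs => if piece = c then rleP piece (cnt + 1) cs else (piece, cnt) :: rleP c 1 cs

-- span-style run-length groups (value, run length)
def rleGroups (xs : List (List Char)) : List (List Char × Nat) :=
  match xs with
  | [] => []
  | x :: rest =>
      (x, (rest.takeWhile (· = x)).length + 1) :: rleGroups (rest.dropWhile (· = x))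
termination_by xs.length
decreasing_by
  have := List.length_dropWhile_le (· = x) rest
  simp; omega

def encLen (gs : List (List Char × Int)) : Int :=
  (gs.map (fun pc => if pc.2 = 1 then (pc.1.length : Int)
                     else ((PySem.Int.toChars pc.2).length : Int) + (pc.1.length : Int))).sum

-- token sum over Nat-count groups (the common middle form)
def tokSum (gs : List (List Char × Nat)) : Int :=
  (gs.map (fun pc => if pc.2 = 1 then (pc.1.length : Int)
                   else ((PySem.Int.toChars (pc.2 : Int)).length : Int) + (pc.1.length : Int))).sum

-- length of A's result string after the final flush
def flushLen (t : List Char × Int × List Char) : Int :=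
  ((t.2.2 ++ (if t.2.1 ≠ 1 then PySem.Int.toChars t.2.1 ++ t.1 else t.1)).length : Int)

lemma solAStep_eq_loopT (sl : List Char) (u : Nat) (hu : 0 < u) :
    ∀ (i : Nat) (piece : List Char) (cnt : Int) (res : List Char),
      solAStep sl u hu piece cnt res i = loopT (chunkSeq sl u hu i) piece cnt res := by
  intro i
  induction hn : sl.length - i using Nat.strong_induction_on generalizing i with
  | _ n ih =>
    intro piece cnt res
    rw [solAStep, chunkSeq]
    by_cases hi : i < sl.length
    · rw [if_pos hi, if_pos hi]
      simp only [loopT]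
      split_ifs <;> exact ih (sl.length - (i + u)) (by omega) (i + u) rfl _ _ _
    · rw [if_neg hi, if_neg hi]; rfl

lemma flushLen_loopT :
    ∀ (cs : List (List Char)) (piece : List Char) (cnt : Int) (res : List Char),
      flushLen (loopT cs piece cnt res) = (res.length : Int) + encLen (rleP piece cnt cs) := by
  intro cs
  induction cs with
  | nil =>
    intro piece cnt res
    simp only [loopT, rleP, flushLen, encLen, List.map, List.sum_cons, List.sum_nil,
      List.length_append]
    by_cases h : cnt = 1 <;> simp [h]
  | cons c cs ih =>
    intro piece cnt res
    simp only [loopT, rleP]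
    by_cases h1 : piece = c
    · rw [if_pos h1, if_pos h1, ih]
    · rw [if_neg h1, if_neg h1]
      by_cases h2 : cnt = 1
      · rw [if_pos h2, ih]
        simp [encLen, h2]
        ring
      · rw [if_neg h2, ih]
        simp [encLen, h2]
        ring

lemma rleP_eq_rleGroups :
    ∀ (cs : List (List Char)) (x : List Char) (k : Nat),
      rleP x (k : Int) cs
        = (x, ((k + (cs.takeWhile (· = x)).length : Nat) : Int))
            :: (rleGroups (cs.dropWhile (· = x))).map (fun pc => (pc.1, (pc.2 : Int))) := by
  intro cs
  induction cs with
  | nil => intro x k; simp [rleP, rleGroups]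
  | cons c cs ih =>
    intro x k
    by_cases h : x = c
    · subst h
      simp only [rleP, if_true]
      have hc : ((k : Int) + 1) = ((k + 1 : Nat) : Int) := by push_cast; ring
      rw [hc, ih]
      simp [List.takeWhile, List.dropWhile]
      ring
    · simp only [rleP, if_neg h]
      have hck : ¬ (c = x) := fun hh => h hh.symm
      rw [List.takeWhile_cons, List.dropWhile_cons]
      simp only [hck, decide_false, Bool.false_eq_true, if_false]
      have h1 : (1 : Int) = ((1 : Nat) : Int) := rfl
      rw [h1, ih c 1, rleGroups]
      simp; ring

lemma encLen_map_cast (gs : List (List Char × Nat)) :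
    encLen (gs.map (fun pc => (pc.1, (pc.2 : Int)))) = tokSum gs := by
  unfold encLen tokSum
  rw [List.map_map]
  congr 1
  refine List.map_congr_left ?_
  intro pc _
  by_cases h : pc.2 = 1 <;> simp [Function.comp, h, Nat.cast_eq_one]

-- the per-unit-length equality: A's compressed-string length = token sum over the runs
lemma per_u_eq (sl : List Char) (u : Nat) (hu : 0 < u) (hsl : sl ≠ []) :
    flushLen (solAStep sl u hu [] 1 [] 0) = tokSum (rleGroups (chunkSeq sl u hu 0)) := by
  rw [solAStep_eq_loopT, flushLen_loopT]
  have hlen : 0 < sl.length := List.length_pos_of_ne_nil hsl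
  rw [chunkSeq, if_pos hlen]
  set c := PySem.List.slice sl (some ((0 : Nat) : Int)) (some (((0 : Nat) : Int) + (u : Int))) with hcdef
  have hcne : c ≠ [] := by
    have hc : c = (sl.drop 0).take u := by
      rw [hcdef]; exact PySem.List.slice_natCast_add sl 0 u
    apply List.ne_nil_of_length_pos
    rw [hc]
    simp [List.length_take]
    omega
  set rest := chunkSeq sl u hu (0 + u)
  have h0 : rleP [] 1 (c :: rest) = ([], 1) :: rleP c 1 rest := by
    rw [rleP, if_neg (fun hh => hcne hh.symm)]
  rw [h0]
  have h1 : encLen ((([], 1) : List Char × Int) :: rleP c 1 rest) = encLen (rleP c 1 rest) := by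
    simp [encLen]
  rw [h1]
  have h2 : (1 : Int) = ((1 : Nat) : Int) := rfl
  rw [h2, rleP_eq_rleGroups rest c 1]
  rw [← encLen_map_cast (rleGroups (c :: rest))]
  rw [show rleGroups (c :: rest)
      = (c, (rest.takeWhile (· = c)).length + 1) :: rleGroups (rest.dropWhile (· = c)) from by
        rw [rleGroups]]
  rw [List.map_cons]
  simp [Nat.add_comm]

-- ============ B-side machinery: break positions, diffs, and the closed formula ============

def brksZ : Int → List (List Char) → List Int
  | _, [] => []
  | _, [_] => []
  | a, x :: y :: r => if x = y then brksZ (a + 1) (y :: r) else (a + 1) :: brksZ (a + 1) (y :: r)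

lemma brksZ_single (a : Int) (x : List Char) : brksZ a [x] = [] := rfl

lemma brksZ_cons2 (a : Int) (x y : List Char) (r : List (List Char)) :
    brksZ a (x :: y :: r)
      = if x = y then brksZ (a + 1) (y :: r) else (a + 1) :: brksZ (a + 1) (y :: r) := rfl



def diffsZ (l : List Int) : List Int := List.zipWith (fun a b => b - a) l l.tail

lemma rleGroups_cons (x : List Char) (rest : List (List Char)) :
    rleGroups (x :: rest)
      = (x, (rest.takeWhile (· = x)).length + 1) :: rleGroups (rest.dropWhile (· = x)) := by
  rw [rleGroups]

lemma diffsZ_cons' (a : Int) (t : List Int) (h : t ≠ []) :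
    diffsZ (a :: t) = (t.head h - a) :: diffsZ t := by
  cases t with
  | nil => exact absurd rfl h
  | cons b r => simp [diffsZ]

lemma coreZ :
    ∀ (xs : List (List Char)) (x : List Char) (a : Int),
      diffsZ ((a :: brksZ a (x :: xs)) ++ [a + (xs.length : Int) + 1])
        = (rleGroups (x :: xs)).map (fun pc => ((pc.2 : Nat) : Int)) := by
  intro xs
  induction xs with
  | nil =>
    intro x a
    rw [brksZ_single, rleGroups_cons]
    simp [diffsZ, rleGroups]
  | cons y r ih =>
    intro x a
    rw [brksZ_cons2, rleGroups_cons]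
    have hE : a + (((y :: r).length : Nat) : Int) + 1 = (a + 1) + (r.length : Int) + 1 := by
      push_cast [List.length_cons]; ring
    by_cases hxy : x = y
    · subst hxy
      rw [if_pos rfl]
      simp only [List.takeWhile_cons, List.dropWhile_cons, decide_true, if_true]
      have hIH := ih x (a + 1)
      rw [rleGroups_cons] at hIH
      have ht : brksZ (a + 1) (x :: r) ++ [(a + 1) + (r.length : Int) + 1] ≠ [] := by simp
      rw [hE, List.cons_append, diffsZ_cons' a _ ht]
      rw [List.cons_append, diffsZ_cons' (a + 1) _ ht] at hIH
      rw [List.map_cons] at hIH ⊢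
      injection hIH with h1 h2
      rw [h2]
      congr 1
      push_cast [List.length_cons] at h1 ⊢
      omega
    · rw [if_neg hxy]
      have hd : (decide (y = x)) = false := decide_eq_false (fun h => hxy h.symm)
      simp only [List.takeWhile_cons, List.dropWhile_cons, hd, Bool.false_eq_true, if_false]
      have hIH := ih y (a + 1)
      have ht : brksZ (a + 1) (y :: r) ++ [(a + 1) + (r.length : Int) + 1] ≠ [] := by simp
      rw [List.cons_append, diffsZ_cons' (a + 1) _ ht] at hIH
      rw [hE, List.cons_append, List.cons_append, diffsZ_cons' a _ (by simp),
        List.head_cons, diffsZ_cons' (a + 1) _ ht, hIH]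
      simp

lemma takeWhile_app_single {α : Type} (p : α → Bool) (l : List α) (t : α) (h : p t = false) :
    (l ++ [t]).takeWhile p = l.takeWhile p := by
  induction l with
  | nil => simp [List.takeWhile, h]
  | cons x r ih =>
    simp only [List.cons_append, List.takeWhile_cons]
    cases hx : p x <;> simp [ih]

lemma dropWhile_app_single {α : Type} (p : α → Bool) (l : List α) (t : α) (h : p t = false) :
    (l ++ [t]).dropWhile p = l.dropWhile p ++ [t] := by
  induction l with
  | nil => simp [List.dropWhile, h]
  | cons x r ih =>
    simp only [List.cons_append, List.dropWhile_cons]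
    cases hx : p x <;> simp [ih]

-- appending one element extends the break list by at most one break
lemma brksZ_append_last :
    ∀ (l : List (List Char)) (x t : List Char) (b : Int), l.getLast? = some x →
      brksZ b (l ++ [t])
        = brksZ b l ++ (if x = t then [] else [b + (l.length : Int)]) := by
  intro l
  induction l with
  | nil => intro x t b hx; simp at hx
  | cons y r ih =>
    intro x t b hx
    cases r with
    | nil =>
      rw [List.cons_append, List.nil_append, brksZ_cons2, brksZ_single,
        show x = y from by simpa using hx.symm]
      by_cases hyt : y = t
      · rw [if_pos hyt, if_pos hyt, brksZ_single]
        simp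
      · rw [if_neg hyt, if_neg hyt, brksZ_single]
        simp
    | cons z r' =>
      have hx' : (z :: r').getLast? = some x := by
        rw [← hx, List.getLast?_cons_cons]
      have hih := ih x t (b + 1) hx'
      rw [List.cons_append] at hih
      rw [List.cons_append, List.cons_append, brksZ_cons2, brksZ_cons2, hih]
      have hlen : (b + 1) + ((z :: r').length : Int) = b + ((y :: z :: r').length : Int) := by
        push_cast [List.length_cons]; ring
      rw [hlen]
      by_cases hyz : y = z
      · rw [if_pos hyz, if_pos hyz]
      · rw [if_neg hyz, if_neg hyz, List.cons_append]

-- filter over an index range = structural breaks of the mapped list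
lemma filt2brks :
    ∀ (m : Nat) (b : Int) (f : Nat → List Char),
      ((List.range m).filter (fun k => decide (f (k + 1) ≠ f k))).map
          (fun k : Nat => b + (k : Int) + 1)
        = brksZ b ((List.range (m + 1)).map f) := by
  intro m
  induction m with
  | zero =>
    intro b f
    simp [brksZ_single]
  | succ m ih =>
    intro b f
    rw [List.range_succ, List.filter_append, List.map_append, ih b f]
    conv_rhs => rw [List.range_succ, List.map_append]
    have hlast : ((List.range (m + 1)).map f).getLast? = some (f m) := by
      rw [List.range_succ, List.map_append]
      simp
    rw [List.map_singleton, brksZ_append_last _ (f m) (f (m + 1)) b hlast]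
    congr 1
    by_cases hf : f m = f (m + 1)
    · have hd : (decide (f (m + 1) ≠ f m)) = false :=
        decide_eq_false (fun hne => hne hf.symm)
      rw [if_pos hf, List.filter_singleton, hd]
      simp
    · have hd : (decide (f (m + 1) ≠ f m)) = true :=
        decide_eq_true (fun hh => hf hh.symm)
      rw [if_neg hf, List.filter_singleton, hd]
      simp only [cond_true, List.map_singleton, List.length_map, List.length_range]
      congr 1
      push_cast
      ring

lemma ceil_split (n u : Nat) (hu : 0 < u) :
    (n + u - 1) / u = n / u + (if n % u = 0 then 0 else 1) := by
  by_cases hr : n % u = 0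
  · have e : n + u - 1 = u * (n / u) + (u - 1) := by
      have h := Nat.div_add_mod n u; omega
    have h1 : (u * (n / u) + (u - 1)) / u = n / u + (u - 1) / u := Nat.mul_add_div hu _ _
    have h2 : (u - 1) / u = 0 := Nat.div_eq_of_lt (by omega)
    rw [e, h1, h2, if_pos hr]
  · have h := Nat.div_add_mod n u
    have hlt : n % u < u := Nat.mod_lt _ hu
    have e : n + u - 1 = u * (n / u) + (n % u - 1) + u := by omega
    have h1 : (u * (n / u) + (n % u - 1) + u) / u = (u * (n / u) + (n % u - 1)) / u + 1 :=
      Nat.add_div_right _ hu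
    have h2 : (u * (n / u) + (n % u - 1)) / u = n / u + (n % u - 1) / u := Nat.mul_add_div hu _ _
    have h3 : (n % u - 1) / u = 0 := Nat.div_eq_of_lt (by omega)
    rw [e, h1, h2, h3, if_neg hr]

lemma rleGroups_app_single :
    ∀ (l : List (List Char)) (t : List Char), (∀ x ∈ l, x ≠ t) →
    rleGroups (l ++ [t]) = rleGroups l ++ [(t, 1)] := by
  intro l
  induction hn : l.length using Nat.strong_induction_on generalizing l with
  | _ n ih =>
    intro t h
    cases l with
    | nil => simp [rleGroups_cons, rleGroups]
    | cons x r =>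
      have hf : (decide (t = x)) = false :=
        decide_eq_false (fun hh => h x (List.mem_cons_self) hh.symm)
      rw [List.cons_append, rleGroups_cons, rleGroups_cons,
        takeWhile_app_single (· = x) r t hf, dropWhile_app_single (· = x) r t hf]
      rw [ih (r.dropWhile (· = x)).length
            (by have := List.length_dropWhile_le (· = x) r; simp at hn ⊢; omega)
            _ rfl t
            (fun y hy => h y (List.mem_cons_of_mem _ ((List.dropWhile_sublist _).subset hy)))]
      simp

lemma rleGroups_mem :
    ∀ (xs : List (List Char)) (pc : List Char × Nat), pc ∈ rleGroups xs → pc.1 ∈ xs ∧ 1 ≤ pc.2 := by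
  intro xs
  induction hn : xs.length using Nat.strong_induction_on generalizing xs with
  | _ n ih =>
    intro pc hpc
    cases xs with
    | nil => simp [rleGroups] at hpc
    | cons x r =>
      rw [rleGroups_cons] at hpc
      rcases List.mem_cons.mp hpc with h | h
      · subst h; simp
      · have := ih (r.dropWhile (· = x)).length
          (by have := List.length_dropWhile_le (· = x) r; simp at hn ⊢; omega) _ rfl pc h
        exact ⟨List.mem_cons_of_mem _ ((List.dropWhile_sublist _).subset this.1), this.2⟩

lemma tokSum_closed (u : Nat) :
    ∀ (gs : List (List Char × Nat)), (∀ pc ∈ gs, pc.1.length = u ∧ 1 ≤ pc.2) →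
      tokSum gs = (u : Int) * gs.length
        + (((gs.map (fun pc => ((pc.2 : Nat) : Int))).filter (fun c => 1 < c)).map
            (fun c => ((PySem.Int.toChars c).length : Int))).sum := by
  intro gs
  induction gs with
  | nil => simp [tokSum]
  | cons pc gs ih =>
    intro h
    have hpc := h pc List.mem_cons_self
    have hrest := fun q hq => h q (List.mem_cons_of_mem _ hq)
    rw [tokSum, List.map_cons, List.sum_cons, ← tokSum, ih hrest,
      List.map_cons, List.filter_cons]
    by_cases h1 : pc.2 = 1
    · rw [if_pos h1]
      have hc : (decide ((1 : Int) < ((pc.2 : Nat) : Int))) = false := by simp [h1]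
      rw [hc]
      simp only [Bool.false_eq_true, if_false, hpc.1, List.length_cons]
      push_cast; ring
    · rw [if_neg h1]
      have h2 : 1 < pc.2 := by omega
      have hc : (decide ((1 : Int) < ((pc.2 : Nat) : Int))) = true := by
        simp; exact_mod_cast h2
      rw [hc]
      simp only [if_true, List.map_cons, List.sum_cons, hpc.1, List.length_cons]
      push_cast; ring

lemma chunkSeq_eq (sl : List Char) (u : Nat) (hu : 0 < u) :
    ∀ i, chunkSeq sl u hu i
      = (List.range ((sl.length - i + u - 1) / u)).map
          (fun j => (sl.drop (i + j * u)).take u) := by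
  have main : ∀ (fuel i : Nat), sl.length - i ≤ fuel →
      chunkSeq sl u hu i
        = (List.range ((sl.length - i + u - 1) / u)).map
            (fun j => (sl.drop (i + j * u)).take u) := by
    intro fuel
    induction fuel with
    | zero =>
      intro i hle
      rw [chunkSeq]
      have hi : ¬ i < sl.length := by omega
      rw [if_neg hi]
      have h0 : (sl.length - i + u - 1) / u = 0 := by
        rw [show sl.length - i = 0 from by omega]
        exact Nat.div_eq_of_lt (by omega)
      rw [h0]
      simp
    | succ f ihf =>
      intro i hle
      rw [chunkSeq]
      by_cases hi : i < sl.length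
      · rw [if_pos hi]
        have hc1 : (sl.length - i + u - 1) / u = (sl.length - i - 1) / u + 1 := by
          rw [show sl.length - i + u - 1 = (sl.length - i - 1) + u from by omega,
            Nat.add_div_right _ hu]
        have hc2 : (sl.length - (i + u) + u - 1) / u = (sl.length - i - 1) / u := by
          by_cases h2 : i + u ≤ sl.length
          · congr 1; omega
          · rw [show sl.length - (i + u) = 0 from by omega,
              Nat.div_eq_of_lt (by omega), Nat.div_eq_of_lt (by omega)]
        rw [hc1, List.range_succ_eq_map, List.map_cons]
        congr 1
        · rw [PySem.List.slice_natCast_add]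
          norm_num
        · rw [List.map_map, ihf (i + u) (by omega), hc2]
          apply List.map_congr_left
          intro j _
          simp only [Function.comp]
          rw [show i + (j + 1) * u = i + u + j * u from by ring]
      · rw [if_neg hi]
        have h0 : (sl.length - i + u - 1) / u = 0 := by
          rw [show sl.length - i = 0 from by omega]
          exact Nat.div_eq_of_lt (by omega)
        rw [h0]
        simp
  exact fun i => main (sl.length - i) i le_rfl

-- per-chunk length: full chunks have length u, the tail chunk length n % u
lemma chunk_len_full (sl : List Char) (u : Nat) (_hu : 0 < u) (j : Nat)
    (hj : j < sl.length / u) : ((sl.drop (j * u)).take u).length = u := by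
  have e : (j + 1) * u = j * u + u := by ring
  have h1 : (j + 1) * u ≤ (sl.length / u) * u := Nat.mul_le_mul_right u hj
  have h2 : (sl.length / u) * u ≤ sl.length := Nat.div_mul_le_self _ _
  simp only [List.length_take, List.length_drop]
  omega

lemma chunk_len_tail (sl : List Char) (u : Nat) (hu : 0 < u) :
    ((sl.drop ((sl.length / u) * u)).take u).length = sl.length % u := by
  have h := Nat.div_add_mod sl.length u
  have hlt : sl.length % u < u := Nat.mod_lt _ hu
  have e : u * (sl.length / u) = (sl.length / u) * u := by ring
  simp only [List.length_take, List.length_drop]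
  omega

lemma tokSum_app_single (gs : List (List Char × Nat)) (t : List Char) :
    tokSum (gs ++ [(t, 1)]) = tokSum gs + (t.length : Int) := by
  simp [tokSum]

-- ===== VERDICT (by name: the statement is the Claim_ definition above) =====
theorem solution_spec : Claim_equal_solution := by
  intro s _
  unfold Spec_solution solution solution_alt
  apply List.foldl_ext
  intro ans k hk
  have hk' : k < s.toList.length - 1 := List.mem_range.mp hk
  dsimp only
  have hn2 : 2 ≤ s.toList.length := by omega
  have hne : s.toList ≠ [] := by
    intro h; rw [h] at hn2; simp at hn2
  have hun : k + 1 < s.toList.length := by omega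
  congr 1
  have hA := per_u_eq s.toList (k + 1) (Nat.succ_pos k) hne
  unfold flushLen at hA
  rw [hA]
  set sl := s.toList with hsldef
  set n := sl.length with hndef
  set u := k + 1 with hudef
  have hu : 0 < u := Nat.succ_pos k
  set fullN := n / u with hfdef
  have hfull : 0 < fullN := Nat.div_pos (le_of_lt hun) hu
  obtain ⟨m, hm⟩ : ∃ m, fullN = m + 1 := ⟨fullN - 1, by omega⟩
  -- the chunk list as a range map
  have hchunk : chunkSeq sl u hu 0
      = (List.range ((n + u - 1) / u)).map (fun j => (sl.drop (j * u)).take u) := by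
    rw [chunkSeq_eq sl u hu 0]
    simp only [Nat.sub_zero, Nat.zero_add]
    rfl
  have hexp : (List.range (m + 1)).map (fun j => (sl.drop (j * u)).take u)
      = (sl.drop (0 * u)).take u :: (List.range m).map (fun j => (sl.drop ((j + 1) * u)).take u) := by
    rw [List.range_succ_eq_map, List.map_cons, List.map_map]
    exact congrArg₂ List.cons rfl (List.map_congr_left (fun j _ => rfl))
  -- B's filtered range = structural breaks of the full-chunk list
  have hB := filt2brks m 0 (fun j => (sl.drop (j * u)).take u)
  have hfc : ((fullN : Int) - 1).toNat = m := by omega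
  have hfilter :
      ((PySem.List.pyRange 1 (fullN : Int) 1).filter
        (fun j => PySem.List.slice sl (some (j * (u : Int))) (some ((j + 1) * (u : Int)))
                ≠ PySem.List.slice sl (some ((j - 1) * (u : Int))) (some (j * (u : Int)))))
      = brksZ 0 ((List.range (m + 1)).map (fun j => (sl.drop (j * u)).take u)) := by
    rw [PySem.List.pyRange_one, hfc, List.filter_map]
    have hpred : ∀ kk ∈ List.range m,
        ((fun j : Int => decide (PySem.List.slice sl (some (j * (u : Int))) (some ((j + 1) * (u : Int)))
            ≠ PySem.List.slice sl (some ((j - 1) * (u : Int))) (some (j * (u : Int)))))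
          ∘ (fun k : Nat => (1 : Int) + k)) kk
        = (fun kk : Nat => decide ((sl.drop ((kk + 1) * u)).take u ≠ (sl.drop (kk * u)).take u)) kk := by
      intro kk _
      simp only [Function.comp]
      have e1 : ((1 : Int) + (kk : Int)) * (u : Int) = (((kk + 1) * u : Nat) : Int) := by
        push_cast; ring
      have e2 : (((1 : Int) + kk) + 1) * (u : Int) = (((kk + 2) * u : Nat) : Int) := by
        push_cast; ring
      have e3 : (((1 : Int) + kk) - 1) * (u : Int) = ((kk * u : Nat) : Int) := by
        push_cast; ring
      rw [e1, e2, e3, PySem.List.slice_natCast, PySem.List.slice_natCast]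
      have f1 : (kk + 2) * u - (kk + 1) * u = u := by
        rw [show (kk + 2) * u = (kk + 1) * u + u from by ring]; omega
      have f2 : (kk + 1) * u - kk * u = u := by
        rw [show (kk + 1) * u = kk * u + u from by ring]; omega
      rw [f1, f2]
    rw [List.filter_congr hpred]
    rw [List.map_congr_left (f := fun k : Nat => (1 : Int) + k)
      (g := fun k : Nat => (0 : Int) + (k : Int) + 1) (fun a _ => by push_cast; ring)]
    exact hB
  rw [hfilter, hexp, List.cons_append]
  -- B's trailing slice is the tail of the cuts list
  have hslice1 : PySem.List.slice
      ((0 : Int) :: (brksZ 0 ((sl.drop (0 * u)).take u :: (List.range m).map (fun j => (sl.drop ((j + 1) * u)).take u)) ++ [(fullN : Int)])) (some 1) none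
      = brksZ 0 ((sl.drop (0 * u)).take u :: (List.range m).map (fun j => (sl.drop ((j + 1) * u)).take u)) ++ [(fullN : Int)] := by
    rw [PySem.List.slice_from_one]
    rfl
  rw [hslice1]
  -- runs = run lengths of the full-chunk list
  have hcore := coreZ ((List.range m).map (fun j => (sl.drop ((j + 1) * u)).take u))
      ((sl.drop (0 * u)).take u) 0
  have hend : (0 : Int)
        + (((List.range m).map (fun j => (sl.drop ((j + 1) * u)).take u)).length : Int) + 1
      = (fullN : Int) := by
    simp [hm]
  rw [hend] at hcore
  simp only [diffsZ, List.cons_append, List.tail_cons] at hcore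
  rw [hcore]
  have hgl : ((rleGroups ((sl.drop (0 * u)).take u :: (List.range m).map (fun j => (sl.drop ((j + 1) * u)).take u))).length : Int)
      = ((brksZ 0 ((sl.drop (0 * u)).take u :: (List.range m).map (fun j => (sl.drop ((j + 1) * u)).take u))).length : Int) + 1 := by
    have h := congrArg List.length hcore
    simp only [List.length_zipWith, List.length_cons, List.length_append,
      List.length_map, List.length_nil] at h
    omega
  -- pieces of the full-chunk runs all have length u
  have hflmem : ∀ x ∈ ((sl.drop (0 * u)).take u :: (List.range m).map (fun j => (sl.drop ((j + 1) * u)).take u)), ∃ j < fullN, x = (sl.drop (j * u)).take u := by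
    intro x hx
    rcases List.mem_cons.mp hx with h | h
    · exact ⟨0, hfull, h⟩
    · rcases List.mem_map.mp h with ⟨j, hj, rfl⟩
      exact ⟨j + 1, by have := List.mem_range.mp hj; omega, rfl⟩
  have hhyp : ∀ pc ∈ rleGroups ((sl.drop (0 * u)).take u :: (List.range m).map (fun j => (sl.drop ((j + 1) * u)).take u)), pc.1.length = u ∧ 1 ≤ pc.2 := by
    intro pc hpc
    have h1 := rleGroups_mem _ pc hpc
    rcases hflmem pc.1 h1.1 with ⟨j, hj, he⟩
    exact ⟨by rw [he]; exact chunk_len_full sl u hu j hj, h1.2⟩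
  have hq := ceil_split n u hu
  by_cases hr : n % u = 0
  · -- no tail chunk
    have hq' : (n + u - 1) / u = m + 1 := by rw [hq, if_pos hr, ← hfdef]; omega
    rw [hchunk, hq', hexp, tokSum_closed u _ hhyp, hgl]
    simp only [List.length_cons, List.length_append, List.length_nil]
    rw [hudef] at hr ⊢
    rw [hndef, hr]
    push_cast
    ring
  · -- the short tail chunk is its own bare run of length n % u
    have hq' : (n + u - 1) / u = (m + 1) + 1 := by rw [hq, if_neg hr, ← hfdef]; omega
    have hdist : ∀ x ∈ ((sl.drop (0 * u)).take u :: (List.range m).map (fun j => (sl.drop ((j + 1) * u)).take u)), x ≠ (sl.drop (fullN * u)).take u := by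
      intro x hx heq
      rcases hflmem x hx with ⟨j, hj, rfl⟩
      have hj' : j < sl.length / u := hj
      have l1 := chunk_len_full sl u hu j hj'
      have l2 := chunk_len_tail sl u hu
      rw [show sl.length / u = fullN from rfl] at l2
      rw [heq] at l1
      have hlt : sl.length % u < u := Nat.mod_lt _ hu
      omega
    rw [hchunk, hq', List.range_succ, List.map_append, List.map_singleton, hexp]
    rw [show (m + 1) = fullN from hm.symm]
    have l2 := chunk_len_tail sl u hu
    rw [show sl.length / u = fullN from rfl] at l2
    rw [rleGroups_app_single _ _ hdist, tokSum_app_single, l2,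
      tokSum_closed u _ hhyp, hgl]
    simp only [List.length_cons, List.length_append, List.length_nil]
    rw [hudef, hndef]
    push_cast
    ring
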